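-- pv_equiv track=rewrite | github.com/NVIDIA-AI-Blueprints/video-search-and-summarization | .github/scripts/poll-downstream-pipeline.py | _format_status_counts
-- ===== SOURCE A (Python) =====
-- def _format_status_counts(counts: dict[str, int]) -> str:
--     if not counts:
--         return "no jobs yet"
--     # Stable, readable order: terminal states first, then in-progress.
--     order = [
--         "success",
--         "failed",
--         "canceled",
--         "skipped",
--         "running",
--         "pending",
--         "manual",
--         "scheduled",
--         "preparing",
--         "waiting_for_resource",
--         "created",
--     ]
--     seen: list[str] = []
--     parts: list[str] = []
--     for key in order:
--         if key in counts:
--             parts.append(f"{key}={counts[key]}")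
--             seen.append(key)
--     for key, value in sorted(counts.items()):
--         if key not in seen:
--             parts.append(f"{key}={value}")
--     return ", ".join(parts)
-- ===== SOURCE B (Python) =====
-- def _format_status_counts(counts: dict[str, int]) -> str:
--     if not counts:
--         return "no jobs yet"
--     order = [
--         "success",
--         "failed",
--         "canceled",
--         "skipped",
--         "running",
--         "pending",
--         "manual",
--         "scheduled",
--         "preparing",
--         "waiting_for_resource",
--         "created",
--     ]
--     rank = {k: i for i, k in enumerate(order)}
--     items = sorted(counts.items(), key=lambda kv: (rank.get(kv[0], len(order)), kv[0]))
--     return ", ".join(f"{k}={v}" for k, v in items)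
-- ===== Notes on version B (the rewrite author's own statement) =====
-- stated objective: idiomatic
-- what changed: A does two passes (a scan over the fixed order list collecting seen keys, then a filtered scan over sorted items); B builds a rank index once and emits everything in a single sort by the composite key (rank.get(key, len(order)), key).
import Mathlib
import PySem

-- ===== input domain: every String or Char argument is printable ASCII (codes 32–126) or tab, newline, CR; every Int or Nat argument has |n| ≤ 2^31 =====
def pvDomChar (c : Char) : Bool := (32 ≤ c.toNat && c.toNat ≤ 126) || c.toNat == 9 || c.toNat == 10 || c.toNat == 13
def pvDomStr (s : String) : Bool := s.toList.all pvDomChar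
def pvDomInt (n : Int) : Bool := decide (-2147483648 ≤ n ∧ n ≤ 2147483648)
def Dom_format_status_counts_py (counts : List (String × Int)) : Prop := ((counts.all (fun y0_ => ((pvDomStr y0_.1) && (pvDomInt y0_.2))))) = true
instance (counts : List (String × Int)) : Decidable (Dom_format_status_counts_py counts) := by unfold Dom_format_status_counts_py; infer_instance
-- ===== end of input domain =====

-- B replaces A's two emission passes (ordered scan with a `seen` list, then a filtered scan over the
-- sorted items) by one sort under the composite key (rank of the key in the order list, key); objective: idiomatic.

-- ===== PORT A =====
def pvOrder : List String :=
  ["success", "failed", "canceled", "skipped", "running", "pending", "manual",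
   "scheduled", "preparing", "waiting_for_resource", "created"]

def format_status_counts_py (counts : List (String × Int)) : String :=
  if counts = [] then "no jobs yet"
  else
    let d : PySem.Dict String Int := PySem.Dict.mk counts
    -- for key in order: if key in counts: parts.append(f"{key}={counts[key]}"); seen.append(key)
    -- (counts[key] ported as d.getD key 0: the branch guarantees the key is present)
    let st := pvOrder.foldl (fun (st : List String × List String) key =>
      if d.contains key then
        (st.1 ++ [key ++ "=" ++ PySem.Int.toStr (d.getD key 0)], st.2 ++ [key])
      else st) ([], [])
    -- for key, value in sorted(counts.items()): if key not in seen: parts.append(f"{key}={value}")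
    let parts := (PySem.List.sorted2 d.items (fun kv => kv.1) (fun kv => kv.2)).foldl
      (fun parts kv =>
        if kv.1 ∉ st.2 then parts ++ [kv.1 ++ "=" ++ PySem.Int.toStr kv.2] else parts) st.1
    PySem.Str.join ", " parts

-- ===== PORT B =====
-- rank = {k: i for i, k in enumerate(order)}
def pvRank : PySem.Dict String Int :=
  (PySem.List.enumerate pvOrder).foldl (fun d ik => d.insert ik.2 ik.1) PySem.Dict.empty

def format_status_counts_py_alt (counts : List (String × Int)) : String :=
  if counts = [] then "no jobs yet"
  else
    let items := PySem.List.sorted2 counts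
      (fun kv => pvRank.getD kv.1 (pvOrder.length : Int)) (fun kv => kv.1)
    PySem.Str.join ", " (items.map (fun kv => kv.1 ++ "=" ++ PySem.Int.toStr kv.2))

-- ===== PRECONDITION & SPEC =====
-- A Python dict always has pairwise-distinct keys; the association-list encoding also admits
-- duplicate-key lists, which no dict argument can produce — exactly those are excluded.
def Pre_format_status_counts_py (counts : List (String × Int)) : Prop :=
  (counts.map Prod.fst).Nodup
instance (counts : List (String × Int)) : Decidable (Pre_format_status_counts_py counts) := by
  unfold Pre_format_status_counts_py; infer_instance

def pvWitness_format_status_counts_py : (List (String × Int)) := [("running", 2), ("zzz", 1)]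

def Spec_format_status_counts_py (counts : List (String × Int)) (out : String) : Prop :=
  out = format_status_counts_py_alt counts
instance (counts : List (String × Int)) (out : String) :
    Decidable (Spec_format_status_counts_py counts out) := by
  unfold Spec_format_status_counts_py; infer_instance

-- ===== CLAIM (what is proved, stated in full; the proofs are below) =====
def Claim_equal_format_status_counts_py : Prop :=
  ∀ (counts : List (String × Int)), Dom_format_status_counts_py counts →
    Pre_format_status_counts_py counts →
    Spec_format_status_counts_py counts (format_status_counts_py counts)

-- ===== LEMMAS AND PROOFS =====

-- sorted2 (Python's tuple key) is sorted under the lexicographic order on the pair of keys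
theorem pv_sorted2_eq_sorted_lex {α κ₁ κ₂ : Type} [LinearOrder κ₁] [LinearOrder κ₂]
    (xs : List α) (k1 : α → κ₁) (k2 : α → κ₂) :
    PySem.List.sorted2 xs k1 k2 = PySem.List.sorted xs (fun x => toLex (k1 x, k2 x)) := by
  rw [PySem.List.sorted_eq_foldl_insertBy]
  show xs.foldl (fun acc x => PySem.List.insertBy _ x acc) [] = _
  congr 1
  funext acc x
  congr 1
  funext a b
  rcases lt_trichotomy (k1 a) (k1 b) with h | h | h
  · simp [Prod.Lex.lt_iff, h, not_lt.mpr (le_of_lt h)]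
  · simp [Prod.Lex.lt_iff, h]
  · simp [Prod.Lex.lt_iff, h, not_lt.mpr (le_of_lt h), ne_of_gt h]

-- the composite sort key B uses
def pvKeyL (kv : String × Int) : Lex (Int × String) :=
  toLex (pvRank.getD kv.1 (pvOrder.length : Int), kv.1)

theorem pv_main (counts : List (String × Int)) (hnd : (counts.map Prod.fst).Nodup) :
    PySem.List.sorted counts pvKeyL =
      (pvOrder.filter (fun k => (PySem.Dict.mk counts).contains k)).map
          (fun k => (k, (PySem.Dict.mk counts).getD k 0)) ++
        (PySem.List.sorted counts (fun kv => toLex (kv.1, kv.2))).filter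
          (fun kv => decide (kv.1 ∉ pvOrder.filter (fun k => (PySem.Dict.mk counts).contains k))) := by
  set d : PySem.Dict String Int := PySem.Dict.mk counts with hd
  have hitems : d.items = counts := rfl
  have hkeys : d.keys = counts.map Prod.fst := rfl
  have hknodup : d.keys.Nodup := by rw [hkeys]; exact hnd
  have hcnd : counts.Nodup := List.Nodup.of_map Prod.fst hnd
  have hcont : ∀ kv : String × Int, kv ∈ counts → d.contains kv.1 = true := by
    intro kv h
    exact (PySem.Dict.contains_iff_mem_keys d kv.1).mpr (by rw [hkeys]; exact List.mem_map_of_mem h)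
  have hgetD : ∀ kv : String × Int, kv ∈ counts → d.getD kv.1 0 = kv.2 := by
    intro kv h
    exact PySem.Dict.getD_of_mem_items d (by rw [hitems]; exact h) hknodup 0
  -- membership of the two halves
  set seen := pvOrder.filter (fun k => d.contains k) with hseen
  set known := seen.map (fun k => (k, d.getD k 0)) with hknown
  set S2 := PySem.List.sorted counts (fun kv : String × Int => toLex (kv.1, kv.2)) with hS2
  set unknown := S2.filter (fun kv => decide (kv.1 ∉ seen)) with hunk
  have hS2p : S2.Perm counts := PySem.List.sorted_perm counts _ false
  have hseen_mem : ∀ k, k ∈ seen ↔ k ∈ pvOrder ∧ d.contains k = true := by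
    intro k; simp [hseen, List.mem_filter]
  have hknown_mem : ∀ kv : String × Int, kv ∈ known ↔ kv.1 ∈ pvOrder ∧ kv ∈ counts := by
    intro ⟨k, v⟩
    constructor
    · intro h
      rcases List.mem_map.mp h with ⟨k', hk', he⟩
      obtain ⟨rfl, rfl⟩ : k' = k ∧ d.getD k' 0 = v := by
        exact ⟨congrArg Prod.fst he, congrArg Prod.snd he⟩
      rcases (hseen_mem k').mp hk' with ⟨ho, hc⟩
      refine ⟨ho, ?_⟩
      rcases (PySem.Dict.contains_iff_mem_keys d k').mp hc with hmemk
      rw [hkeys] at hmemk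
      rcases List.mem_map.mp hmemk with ⟨⟨k2, v2⟩, hin, he2⟩
      cases he2
      rw [hgetD _ hin]
      exact hin
    · intro ⟨ho, hin⟩
      refine List.mem_map.mpr ⟨k, (hseen_mem k).mpr ⟨ho, hcont _ hin⟩, ?_⟩
      rw [hgetD ⟨k, v⟩ hin]
  have hunk_mem : ∀ kv : String × Int, kv ∈ unknown ↔ kv ∈ counts ∧ kv.1 ∉ pvOrder := by
    intro kv
    rw [hunk, List.mem_filter]
    rw [hS2p.mem_iff]
    simp only [decide_eq_true_eq]
    constructor
    · intro ⟨h1, h2⟩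
      exact ⟨h1, fun ho => h2 ((hseen_mem kv.1).mpr ⟨ho, hcont kv h1⟩)⟩
    · intro ⟨h1, h2⟩
      exact ⟨h1, fun hs => h2 ((hseen_mem kv.1).mp hs).1⟩
  -- rank facts
  have hrank_lt : ∀ k ∈ pvOrder, pvRank.getD k (pvOrder.length : Int) < (pvOrder.length : Int) := by decide
  have hrank_eq : ∀ k, k ∉ pvOrder → pvRank.getD k (pvOrder.length : Int) = (pvOrder.length : Int) := by
    intro k hk
    have hc : pvRank.contains k = false := by
      by_contra h
      have : pvRank.contains k = true := by
        cases hh : pvRank.contains k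
        · exact absurd hh h
        · rfl
      exact hk (by
        have := (PySem.Dict.contains_iff_mem_keys pvRank k).mp this
        have hko : pvRank.keys = pvOrder := by decide
        rwa [hko] at this)
    exact PySem.Dict.getD_of_not_contains pvRank _ hc
  -- nodups
  have hknown_nd : known.Nodup := by
    refine List.Nodup.map ?_ ((by decide : pvOrder.Nodup).filter _)
    intro a b h
    exact congrArg Prod.fst h
  have hunk_nd : unknown.Nodup := ((hS2p.nodup_iff).mpr hcnd).filter _
  have hdisj : List.Disjoint known unknown := by
    intro kv h1 h2
    exact ((hunk_mem kv).mp h2).2 ((hknown_mem kv).mp h1).1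
  apply PySem.List.sorted_eq_of_perm_of_pairwise_lt
  · rw [List.perm_ext_iff_of_nodup (List.Nodup.append hknown_nd hunk_nd hdisj) hcnd]
    intro kv
    rw [List.mem_append, hknown_mem, hunk_mem]
    constructor
    · rintro (⟨_, h⟩ | ⟨h, _⟩) <;> exact h
    · intro h
      by_cases ho : kv.1 ∈ pvOrder
      · exact Or.inl ⟨ho, h⟩
      · exact Or.inr ⟨h, ho⟩
  · rw [List.pairwise_append]
    refine ⟨?_, ?_, ?_⟩
    · -- within known: strictly increasing rank
      rw [List.pairwise_map]
      have h0 : pvOrder.Pairwise (fun a b => pvRank.getD a (pvOrder.length : Int) < pvRank.getD b (pvOrder.length : Int)) := by decide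
      refine (h0.filter _).imp ?_
      intro a b h
      simp only [pvKeyL, Prod.Lex.lt_iff, ofLex_toLex]
      exact Or.inl h
    · -- within unknown: same rank bucket, keys strictly increasing
      have h1 : S2.Pairwise (fun a b : String × Int => (toLex (a.1, a.2)) ≤ toLex (b.1, b.2)) :=
        PySem.List.sorted_pairwise counts _
      have hm : (S2.map Prod.fst).Nodup := (hS2p.map Prod.fst).nodup_iff.mpr hnd
      have h2 : S2.Pairwise (fun a b : String × Int => a.1 ≠ b.1) := by
        rw [List.nodup_iff_pairwise_ne, List.pairwise_map] at hm
        exact hm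
      have h3 := (h1.and h2).filter (fun kv => decide (kv.1 ∉ seen))
      refine List.Pairwise.imp_of_mem ?_ h3
      intro a b ha hb ⟨hle, hne⟩
      have hna : a.1 ∉ pvOrder := ((hunk_mem a).mp ha).2
      have hnb : b.1 ∉ pvOrder := ((hunk_mem b).mp hb).2
      have hlt : a.1 < b.1 := by
        rcases Prod.Lex.le_iff.mp hle with h | ⟨he, _⟩
        · exact h
        · exact absurd he hne
      simp only [pvKeyL, Prod.Lex.lt_iff, ofLex_toLex]
      exact Or.inr ⟨by rw [hrank_eq _ hna, hrank_eq _ hnb], hlt⟩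
    · intro a ha b hb
      have h1 : a.1 ∈ pvOrder := ((hknown_mem a).mp ha).1
      have h2 : b.1 ∉ pvOrder := ((hunk_mem b).mp hb).2
      simp only [pvKeyL, Prod.Lex.lt_iff, ofLex_toLex]
      exact Or.inl (by rw [hrank_eq _ h2]; exact hrank_lt _ h1)

theorem pv_equal (counts : List (String × Int)) (hnd : (counts.map Prod.fst).Nodup) :
    format_status_counts_py counts = format_status_counts_py_alt counts := by
  unfold format_status_counts_py format_status_counts_py_alt
  by_cases h : counts = []
  · simp [h]
  · simp only [if_neg h]
    set d : PySem.Dict String Int := PySem.Dict.mk counts with hd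
    have step1 : pvOrder.foldl (fun (st : List String × List String) key =>
        if d.contains key then
          (st.1 ++ [key ++ "=" ++ PySem.Int.toStr (d.getD key 0)], st.2 ++ [key])
        else st) ([], []) =
        ((pvOrder.filter (fun k => d.contains k)).map
            (fun key => key ++ "=" ++ PySem.Int.toStr (d.getD key 0)),
          pvOrder.filter (fun k => d.contains k)) := by
      rw [PySem.List.foldl_congr_mem pvOrder _
        (fun (st : List String × List String) key =>
          (if d.contains key then st.1 ++ [key ++ "=" ++ PySem.Int.toStr (d.getD key 0)] else st.1,
           if d.contains key then st.2 ++ [key] else st.2))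
        ([], [])
        (by intro acc x _; by_cases hc : d.contains x <;> simp [hc])]
      rw [PySem.List.foldl_prod_mk
        (f := fun acc key => if d.contains key then acc ++ [key ++ "=" ++ PySem.Int.toStr (d.getD key 0)] else acc)
        (g := fun acc key => if d.contains key then acc ++ [key] else acc)]
      rw [PySem.List.foldl_append_if (p := fun k => d.contains k),
        PySem.List.foldl_append_if_eq_filter (p := fun k => d.contains k)]
      simp
    rw [step1]
    rw [PySem.List.foldl_append_ite
      (p := fun kv : String × Int => kv.1 ∉ pvOrder.filter (fun k => d.contains k))
      (f := fun kv : String × Int => kv.1 ++ "=" ++ PySem.Int.toStr kv.2)]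
    have hb : PySem.List.sorted2 counts
        (fun kv : String × Int => pvRank.getD kv.1 (pvOrder.length : Int))
        (fun kv : String × Int => kv.1) = PySem.List.sorted counts pvKeyL :=
      pv_sorted2_eq_sorted_lex counts _ _
    rw [hb, pv_sorted2_eq_sorted_lex, pv_main counts hnd, List.map_append, List.map_map]
    rfl

-- ===== VERDICT (by name: the statement is the Claim_ definition above) =====
theorem format_status_counts_py_spec : Claim_equal_format_status_counts_py := by
  intro counts _ hnd
  unfold Spec_format_status_counts_py
  exact pv_equal counts hnd
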